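-- pv_equiv track=rewrite | github.com/CCOcampo/Python_Exercises | General_Exercises/Even_Tree/EvenTree.py | evenForest
-- ===== SOURCE A (Python) =====
-- def evenForest(t_nodes, t_edges, t_from, t_to):
--     #Crear una lista de listas según el numero de nodos
--     tree = [[] for _ in range(t_nodes + 1)]
--
--     #Construcción del arbol teniendo en cuenta aristas de cada lista
--     for u, v in zip(t_from, t_to):
--         tree[u].append(v)
--         tree[v].append(u)
--
--     #Variables para crear el arbol
--     subtree_size = [0] * (t_nodes + 1)
--     visited = [False] * (t_nodes + 1)
--
--     def dfs(node):
--         visited[node] = True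
--         subtree_size[node] = 1
--         for neighbor in tree[node]:
--             if not visited[neighbor]:
--                 dfs(neighbor)
--                 subtree_size[node] += subtree_size[neighbor]
--
--     dfs(1)
--
--     #Aristas que se pueden eliminar manteniendo la estructura del subarbol
--     removable_edges = 0
--     for i in range(2, t_nodes + 1):
--         if subtree_size[i] % 2 == 0:
--             removable_edges += 1
--
--     return removable_edges
-- ===== SOURCE B (Python) =====
-- def evenForest(t_nodes, t_edges, t_from, t_to):
--     # Iterative re-implementation: same adjacency lists, but the recursive dfs is
--     # replaced by an explicit-stack post-order machine over (node, next-child-index)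
--     # frames; a finished node's size is added to the frame below it.
--     adj = [[] for _ in range(t_nodes + 1)]
--     for u, v in zip(t_from, t_to):
--         adj[u].append(v)
--         adj[v].append(u)
--
--     size = [0] * (t_nodes + 1)
--     seen = [False] * (t_nodes + 1)
--     seen[1] = True
--     size[1] = 1
--     stack = [(1, 0)]
--     while stack:
--         node, i = stack.pop()
--         if i < len(adj[node]):
--             stack.append((node, i + 1))
--             nb = adj[node][i]
--             if not seen[nb]:
--                 seen[nb] = True
--                 size[nb] = 1
--                 stack.append((nb, 0))
--         elif stack:
--             parent = stack[-1][0]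
--             size[parent] += size[node]
--
--     return sum(1 for i in range(2, t_nodes + 1) if size[i] % 2 == 0)
-- ===== Notes on version B (the rewrite author's own statement) =====
-- stated objective: alternative
-- what changed: The recursive dfs (mutating visited/subtree_size via nested Python calls) is replaced by an explicit-stack iterative post-order machine over (node, next-child-index) frames that adds a finished node's size to the frame below it; adjacency building and the final even-size count are unchanged.
import Mathlib
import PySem

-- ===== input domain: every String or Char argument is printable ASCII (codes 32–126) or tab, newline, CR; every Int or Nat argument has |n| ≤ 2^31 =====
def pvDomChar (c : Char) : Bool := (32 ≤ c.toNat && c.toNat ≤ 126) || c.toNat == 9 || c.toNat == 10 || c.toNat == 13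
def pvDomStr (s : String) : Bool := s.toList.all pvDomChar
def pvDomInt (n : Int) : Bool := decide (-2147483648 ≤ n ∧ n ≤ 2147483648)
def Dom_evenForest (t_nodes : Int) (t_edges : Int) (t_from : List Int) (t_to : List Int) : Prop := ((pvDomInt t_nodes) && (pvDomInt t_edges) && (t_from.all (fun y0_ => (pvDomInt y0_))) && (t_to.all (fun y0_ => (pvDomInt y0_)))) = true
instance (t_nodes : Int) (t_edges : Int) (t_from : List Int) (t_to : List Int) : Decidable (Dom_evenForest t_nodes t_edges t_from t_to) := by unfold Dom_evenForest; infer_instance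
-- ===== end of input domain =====

-- B replaces A's recursive dfs by an explicit-stack iterative post-order traversal
-- producing the same subtree sizes (objective: alternative decomposition, not faster).
-- Return-value equivalence only; neither Python mutates its arguments.

-- ===== PORT A =====
-- Python list indexing l[i], exact for -len ≤ i < len (negative indices wrap);
-- outside that range Python raises IndexError: such inputs are excluded by
-- Pre_evenForest, and the read default / set no-op there is never claimed about
-- (the default `true` on visited reads merely keeps the traversal total there).
-- getW/setW index Python lists kept as Lean Lists (the adjacency lists);
-- getA/setA are the same operations on the two node arrays, kept as Arrays so the
-- ports evaluate fast; an Array is the same Python list value.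
def wrapIdx (len : Nat) (i : Int) : Int := if i < 0 then i + len else i

def getW {α : Type} (l : List α) (i : Int) (d : α) : α :=
  if 0 ≤ wrapIdx l.length i ∧ wrapIdx l.length i < (l.length : Int) then
    l.getD (wrapIdx l.length i).toNat d
  else d

def setW {α : Type} (l : List α) (i : Int) (x : α) : List α :=
  if 0 ≤ wrapIdx l.length i ∧ wrapIdx l.length i < (l.length : Int) then
    l.set (wrapIdx l.length i).toNat x
  else l

def getA {α : Type} (a : Array α) (i : Int) (d : α) : α :=
  if 0 ≤ wrapIdx a.size i ∧ wrapIdx a.size i < (a.size : Int) then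
    a.getD (wrapIdx a.size i).toNat d
  else d

def setA {α : Type} (a : Array α) (i : Int) (x : α) : Array α :=
  if 0 ≤ wrapIdx a.size i ∧ wrapIdx a.size i < (a.size : Int) then
    a.setIfInBounds (wrapIdx a.size i).toNat x
  else a

-- both Pythons build the adjacency lists identically
def buildTree (t_nodes : Int) (t_from : List Int) (t_to : List Int) : List (List Int) :=
  (t_from.zip t_to).foldl
    (fun t uv =>
      let t1 := setW t uv.1 (getW t uv.1 [] ++ [uv.2])
      setW t1 uv.2 (getW t1 uv.2 [] ++ [uv.1]))
    (List.replicate (t_nodes + 1).toNat [])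

def countFalse (l : List Bool) : Nat := l.count false

def countFalseA (a : Array Bool) : Nat := countFalse a.toList

-- A's recursive dfs: dfsA processes the remaining neighbour list of `node`
-- (the mark 'visited[node]=True; subtree_size[node]=1' is done at the call site,
-- exactly as dfs does it on entry).  `fuel` only makes the nested recursion
-- structurally total; under the invariant countFalseA ≤ fuel (established at the
-- entry call and preserved, see simB) the fuel-0 branch is unreachable.
def dfsA (tree : List (List Int)) : Nat → Int → List Int → (Array Bool × Array Int) → (Array Bool × Array Int)
  | _, _, [], st => st
  | 0, node, nb :: rest, st =>
    if getA st.1 nb true = false then st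
    else dfsA tree 0 node rest st
  | f + 1, node, nb :: rest, st =>
    if getA st.1 nb true = false then
      let stm := (setA st.1 nb true, setA st.2 nb 1)
      let st1 := dfsA tree f nb (getW tree nb []) stm
      let st2 := (st1.1, setA st1.2 node (getA st1.2 node 0 + getA st1.2 nb 0))
      dfsA tree (f + 1) node rest st2
    else dfsA tree (f + 1) node rest st
termination_by fuel _ nbs _ => (fuel, nbs.length)

def evenForest (t_nodes : Int) (t_edges : Int) (t_from : List Int) (t_to : List Int) : Int :=
  let tree := buildTree t_nodes t_from t_to
  let visited := Array.replicate (t_nodes + 1).toNat false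
  let size : Array Int := Array.replicate (t_nodes + 1).toNat 0
  let st := dfsA tree (t_nodes + 1).toNat 1 (getW tree 1 []) (setA visited 1 true, setA size 1 1)
  (PySem.List.pyRange 2 (t_nodes + 1) 1).foldl
    (fun acc i => if getA st.2 i 0 % 2 = 0 then acc + 1 else acc) 0

-- ===== PORT B =====
-- the stack machine: frames (node, next child index); a finished node's size is
-- added to the node of the frame below it (Python's stack[-1]).
def finishB (s : List (Int × Int)) (node : Int) (st : Array Bool × Array Int) : Array Bool × Array Int :=
  match s with
  | [] => st
  | (p, _) :: _ => (st.1, setA st.2 p (getA st.2 p 0 + getA st.2 node 0))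

def stackWeight (tree : List (List Int)) (s : List (Int × Int)) : Nat :=
  s.foldr (fun f acc => ((((getW tree f.1 []).length : Int) + 1 - f.2).toNat + 1) + acc) 0

-- lemmas the definition of runB needs (termination)
theorem countFalse_set_lt (l : List Bool) (k : Nat) (hk : k < l.length) (h : l.getD k true = false) :
    countFalse (l.set k true) < countFalse l := by
  induction l generalizing k with
  | nil => simp at hk
  | cons a l ih =>
    cases k with
    | zero =>
      simp [List.getD] at h
      subst h
      simp [countFalse]
    | succ k =>
      have := ih k (by simpa using hk) (by simpa [List.getD] using h)
      cases a <;> simp [countFalse] at * <;> omega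

theorem countFalseA_setA_lt (a : Array Bool) (i : Int) (h : getA a i true = false) :
    countFalseA (setA a i true) < countFalseA a := by
  unfold getA at h
  unfold setA
  by_cases hj : 0 ≤ wrapIdx a.size i ∧ wrapIdx a.size i < (a.size : Int)
  · rw [if_pos hj] at h
    rw [if_pos hj]
    have hk : (wrapIdx a.size i).toNat < a.size := by omega
    have hget : a.toList.getD (wrapIdx a.size i).toNat true = false := by
      rw [List.getD_eq_getElem _ _ (by simpa using hk)]
      rw [Array.getD, dif_pos hk] at h
      simpa using h
    have := countFalse_set_lt a.toList (wrapIdx a.size i).toNat (by simpa using hk) hget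
    simpa [countFalseA, Array.toList_setIfInBounds] using this
  · rw [if_neg hj] at h
    simp at h

theorem finishB_fst (s : List (Int × Int)) (node : Int) (st : Array Bool × Array Int) :
    (finishB s node st).1 = st.1 := by
  cases s with
  | nil => rfl
  | cons p s => rfl

def runB (tree : List (List Int)) (stack : List (Int × Int)) (st : Array Bool × Array Int) :
    Array Bool × Array Int :=
  match stack with
  | [] => st
  | (node, i) :: s =>
    if i < ((getW tree node []).length : Int) then
      let nb := getW (getW tree node []) i 0
      if getA st.1 nb true = false then
        runB tree ((nb, 0) :: (node, i + 1) :: s) (setA st.1 nb true, setA st.2 nb 1)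
      else runB tree ((node, i + 1) :: s) st
    else runB tree s (finishB s node st)
termination_by (countFalseA st.1, stackWeight tree stack)
decreasing_by
  · exact Prod.Lex.left _ _ (countFalseA_setA_lt _ _ (by assumption))
  · apply Prod.Lex.right
    simp only [stackWeight, List.foldr_cons]
    omega
  · rw [finishB_fst]
    apply Prod.Lex.right
    simp only [stackWeight, List.foldr_cons]
    omega

def evenForest_alt (t_nodes : Int) (t_edges : Int) (t_from : List Int) (t_to : List Int) : Int :=
  let tree := buildTree t_nodes t_from t_to
  let visited := Array.replicate (t_nodes + 1).toNat false
  let size : Array Int := Array.replicate (t_nodes + 1).toNat 0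
  let st := runB tree [(1, 0)] (setA visited 1 true, setA size 1 1)
  (PySem.List.pyRange 2 (t_nodes + 1) 1).foldl
    (fun acc i => acc + (if getA st.2 i 0 % 2 = 0 then 1 else 0)) 0

-- ===== PRECONDITION & SPEC =====
-- Exactly the inputs on which Python A returns: at least one node (else dfs(1)
-- hits IndexError) and every edge endpoint a valid Python index into the
-- (t_nodes+1)-element node arrays, i.e. in -(t_nodes+1) .. t_nodes (negative
-- labels wrap; outside that range Python raises IndexError).
def Pre_evenForest (t_nodes : Int) (t_edges : Int) (t_from : List Int) (t_to : List Int) : Prop :=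
  1 ≤ t_nodes ∧
    ∀ p ∈ t_from.zip t_to,
      -(t_nodes + 1) ≤ p.1 ∧ p.1 ≤ t_nodes ∧ -(t_nodes + 1) ≤ p.2 ∧ p.2 ≤ t_nodes
instance (t_nodes : Int) (t_edges : Int) (t_from : List Int) (t_to : List Int) : Decidable (Pre_evenForest t_nodes t_edges t_from t_to) := by unfold Pre_evenForest; infer_instance

def pvWitness_evenForest : Int × Int × List Int × List Int := (4, 3, [1, 1, 3], [2, 3, 4])

def Spec_evenForest (t_nodes : Int) (t_edges : Int) (t_from : List Int) (t_to : List Int) (out : Int) : Prop := out = evenForest_alt t_nodes t_edges t_from t_to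
instance (t_nodes : Int) (t_edges : Int) (t_from : List Int) (t_to : List Int) (out : Int) : Decidable (Spec_evenForest t_nodes t_edges t_from t_to out) := by unfold Spec_evenForest; infer_instance

-- ===== CLAIM (what is proved, stated in full; the proofs are below) =====
def Claim_equal_evenForest : Prop := ∀ (t_nodes : Int) (t_edges : Int) (t_from : List Int) (t_to : List Int), Dom_evenForest t_nodes t_edges t_from t_to → Pre_evenForest t_nodes t_edges t_from t_to → Spec_evenForest t_nodes t_edges t_from t_to (evenForest t_nodes t_edges t_from t_to)

-- ===== LEMMAS AND PROOFS =====

theorem countFalse_set_le (l : List Bool) (k : Nat) : countFalse (l.set k true) ≤ countFalse l := by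
  induction l generalizing k with
  | nil => simp [countFalse]
  | cons a l ih =>
    cases k with
    | zero => cases a <;> simp [countFalse]
    | succ k =>
      have := ih k
      cases a <;> simp [countFalse] at * <;> omega

theorem countFalseA_setA_le (a : Array Bool) (i : Int) :
    countFalseA (setA a i true) ≤ countFalseA a := by
  unfold setA
  by_cases hj : 0 ≤ wrapIdx a.size i ∧ wrapIdx a.size i < (a.size : Int)
  · rw [if_pos hj]
    have := countFalse_set_le a.toList (wrapIdx a.size i).toNat
    simpa [countFalseA, Array.toList_setIfInBounds] using this
  · rw [if_neg hj]

theorem countFalseA_getA_pos (a : Array Bool) (i : Int) (h : getA a i true = false) :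
    0 < countFalseA a := by
  unfold getA at h
  by_cases hj : 0 ≤ wrapIdx a.size i ∧ wrapIdx a.size i < (a.size : Int)
  · rw [if_pos hj] at h
    have hk : (wrapIdx a.size i).toNat < a.size := by omega
    rw [Array.getD, dif_pos hk] at h
    have hmem : false ∈ a.toList := by
      have : a.toList[(wrapIdx a.size i).toNat] = false := by simpa using h
      exact this ▸ List.getElem_mem (by simpa using hk)
    exact List.count_pos_iff.mpr hmem
  · rw [if_neg hj] at h
    simp at h

theorem dfsA_mono (tree : List (List Int)) (fuel : Nat) (node : Int) (nbs : List Int)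
    (st : Array Bool × Array Int) :
    countFalseA (dfsA tree fuel node nbs st).1 ≤ countFalseA st.1 := by
  induction fuel using Nat.strong_induction_on generalizing node nbs st with
  | _ fuel ihf =>
    induction nbs generalizing st with
    | nil => cases fuel <;> simp [dfsA]
    | cons nb rest ihl =>
      match fuel with
      | 0 =>
        rw [dfsA]
        by_cases h : getA st.1 nb true = false
        · simp only [h, if_true]
          exact le_refl _
        · simp only [h]
          exact ihl st
      | f + 1 =>
        rw [dfsA]
        by_cases h : getA st.1 nb true = false
        · simp only [h, if_true]
          refine le_trans (ihl _) ?_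
          refine le_trans (ihf f (Nat.lt_succ_self f) nb _ _) ?_
          exact countFalseA_setA_le _ _
        · simp only [h]
          exact ihl st

-- nonnegative in-range indexing through getW is plain getD
theorem getW_nonneg (l : List Int) (i : Int) (d : Int) (h0 : 0 ≤ i) (hl : i.toNat < l.length) :
    getW l i d = l.getD i.toNat d := by
  have hw : wrapIdx l.length i = i := by
    unfold wrapIdx
    rw [if_neg (by omega)]
  unfold getW
  rw [hw, if_pos ⟨h0, by omega⟩]

theorem getD_of_drop_cons {α : Type} (l : List α) (k : Nat) (a : α) (r : List α) (d : α)
    (h : l.drop k = a :: r) : l.getD k d = a := by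
  have hk : k < l.length := by
    by_contra hge
    rw [List.drop_eq_nil_of_le (by omega)] at h
    exact absurd h (by simp)
  have : l[k]? = some a := by
    rw [← List.head?_drop, h]
    rfl
  simp [List.getD, this]

-- Simulation: a frame (node, i) on top of stack s behaves like A's recursive visit
-- of the remaining neighbours tree[node][i:], followed by finishing into s.
theorem simB (tree : List (List Int)) (fA : Nat) (nbs : List Int) :
    ∀ (node i : Int) (s : List (Int × Int)) (st : Array Bool × Array Int),
      0 ≤ i → (getW tree node []).drop i.toNat = nbs → countFalseA st.1 ≤ fA →
      runB tree ((node, i) :: s) st = runB tree s (finishB s node (dfsA tree fA node nbs st)) := by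
  induction fA using Nat.strong_induction_on generalizing nbs with
  | _ fA ihf =>
    induction nbs with
    | nil =>
      intro node i s st hi hdrop hcf
      have hlen : (getW tree node []).length ≤ i.toNat := by
        by_contra hlt
        rw [List.drop_eq_nil_iff] at hdrop
        omega
      rw [runB]
      have : ¬ (i < ((getW tree node []).length : Int)) := by omega
      simp only [this, if_false]
      cases fA <;> simp [dfsA]
    | cons nb rest ihl =>
      intro node i s st hi hdrop hcf
      have hk : i.toNat < (getW tree node []).length := by
        by_contra hge
        rw [List.drop_eq_nil_of_le (by omega)] at hdrop
        exact absurd hdrop (by simp)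
      have hnb : getW (getW tree node []) i 0 = nb := by
        rw [getW_nonneg _ _ _ hi hk]
        exact getD_of_drop_cons _ _ _ _ _ hdrop
      have hdrop' : (getW tree node []).drop (i + 1).toNat = rest := by
        have h1 : (i + 1).toNat = i.toNat + 1 := by omega
        rw [h1, ← List.drop_drop, hdrop]
        rfl
      rw [runB]
      have hlt : i < ((getW tree node []).length : Int) := by omega
      simp only [hlt, if_true, hnb]
      by_cases hv : getA st.1 nb true = false
      · simp only [hv, if_true]
        cases fA with
        | zero =>
          exact absurd (countFalseA_getA_pos st.1 nb hv) (by omega)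
        | succ f =>
          rw [dfsA]
          simp only [hv, if_true]
          have hcf1 : countFalseA (setA st.1 nb true, setA st.2 nb 1).1 ≤ f := by
            have h1 := countFalseA_setA_lt st.1 nb hv
            show countFalseA (setA st.1 nb true) ≤ f
            omega
          rw [ihf f (Nat.lt_succ_self f) (getW tree nb []) nb 0 ((node, i + 1) :: s)
            _ (by omega) (by simp) hcf1]
          have hcf2 : countFalseA (dfsA tree f nb (getW tree nb [])
              (setA st.1 nb true, setA st.2 nb 1)).1 ≤ f + 1 := by
            refine le_trans (dfsA_mono _ _ _ _ _) ?_
            have := countFalseA_setA_lt st.1 nb hv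
            omega
          have hfin : finishB ((node, i + 1) :: s) nb
              (dfsA tree f nb (getW tree nb []) (setA st.1 nb true, setA st.2 nb 1))
              = ((dfsA tree f nb (getW tree nb []) (setA st.1 nb true, setA st.2 nb 1)).1,
                 setA (dfsA tree f nb (getW tree nb []) (setA st.1 nb true, setA st.2 nb 1)).2 node
                   (getA (dfsA tree f nb (getW tree nb []) (setA st.1 nb true, setA st.2 nb 1)).2 node 0 +
                    getA (dfsA tree f nb (getW tree nb []) (setA st.1 nb true, setA st.2 nb 1)).2 nb 0)) := rfl
          rw [hfin]
          rw [ihl node (i + 1) s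
            ((dfsA tree f nb (getW tree nb []) (setA st.1 nb true, setA st.2 nb 1)).1,
             setA (dfsA tree f nb (getW tree nb []) (setA st.1 nb true, setA st.2 nb 1)).2 node
               (getA (dfsA tree f nb (getW tree nb []) (setA st.1 nb true, setA st.2 nb 1)).2 node 0 +
                getA (dfsA tree f nb (getW tree nb []) (setA st.1 nb true, setA st.2 nb 1)).2 nb 0))
            (by omega) hdrop' (by exact hcf2)]
      · simp only [hv]
        cases fA <;>
          (rw [dfsA]; simp only [hv]; exact ihl node (i + 1) s st (by omega) hdrop' hcf)

theorem countFalseA_replicate (n : Nat) : countFalseA (Array.replicate n false) = n := by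
  simp [countFalseA, countFalse]

theorem simB_entry (tree : List (List Int)) (fA : Nat) (st0 : Array Bool × Array Int)
    (hcf : countFalseA st0.1 ≤ fA) :
    runB tree [(1, 0)] st0 = dfsA tree fA 1 (getW tree 1 []) st0 := by
  rw [simB tree fA (getW tree 1 []) 1 0 [] st0 (by omega) (by simp) hcf]
  simp [runB, finishB]

-- A counts with 'if … then acc+1 else acc', B with 'acc + (if … then 1 else 0)'.
theorem fold_count_eq (sz : Array Int) (l : List Int) (acc : Int) :
    l.foldl (fun acc i => if getA sz i 0 % 2 = 0 then acc + 1 else acc) acc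
      = l.foldl (fun acc i => acc + (if getA sz i 0 % 2 = 0 then 1 else 0)) acc := by
  induction l generalizing acc with
  | nil => rfl
  | cons x l ih =>
    simp only [List.foldl_cons]
    rw [ih]
    congr 1
    split <;> omega

-- ===== VERDICT (by name: the statement is the Claim_ definition above) =====
theorem evenForest_spec : Claim_equal_evenForest := by
  intro t_nodes t_edges t_from t_to _hdom _hpre
  unfold Spec_evenForest
  simp only [evenForest, evenForest_alt]
  rw [fold_count_eq]
  rw [simB_entry (buildTree t_nodes t_from t_to) (t_nodes + 1).toNat
    (setA (Array.replicate (t_nodes + 1).toNat false) 1 true,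
     setA (Array.replicate (t_nodes + 1).toNat (0 : Int)) 1 1)
    (by exact le_trans (countFalseA_setA_le _ _) (le_of_eq (countFalseA_replicate _)))]
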